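-- pv_equiv track=rewrite | github.com/Manojna52/data-structures-with-python | farapro.py | formatproduct
-- ===== SOURCE A (Python) =====
-- def formatproduct(A,B):
--     x=int(A)
--     y=int(B)
--     val1=1
--     for i in range(x,y+1):
--         val1=val1*i
--     count=0
--     r=0
--     ac=''
--     while(val1!=0):
--         r=val1%10
--         if r==0:
--             count=count+1
--             val1=val1//10
--         else:
--             break
--     if len(str(val1))<=10:
--         ac=ac+str(val1)+"*"+"10"+"^"+str(count)
--         return ac
--     else:
--         val1=str(val1)
--         c1=val1[:5]
--         c2=val1[len(val1)-5:]
--         ac=ac+c1+"..."+c2+"*"+"10"+"^"+str(count)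
--         return ac
-- ===== SOURCE B (Python) =====
-- def formatproduct(A, B):
--     # balanced divide-and-conquer range product; trailing zeros stripped in 10**18 chunks
--     def prod(lo, hi):
--         if lo > hi:
--             return 1
--         if lo == hi:
--             return lo
--         mid = (lo + hi) // 2
--         return prod(lo, mid) * prod(mid + 1, hi)
--     p = prod(int(A), int(B))
--     count = 0
--     CHUNK = 10 ** 18
--     while p != 0 and p % CHUNK == 0:
--         p //= CHUNK
--         count += 18
--     while p != 0 and p % 10 == 0:
--         p //= 10
--         count += 1
--     s = str(p)
--     if len(s) > 10:
--         s = s[:5] + "..." + s[len(s) - 5:]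
--     return s + "*10^" + str(count)
-- ===== Notes on version B (the rewrite author's own statement) =====
-- stated objective: alternative
-- what changed: The sequential accumulate over range(x, y+1) is replaced by a balanced divide-and-conquer product tree, and the one-digit-at-a-time trailing-zero loop is replaced by a two-phase strip that removes 18 zeros per division (10**18 chunks) before finishing digit by digit.
import Mathlib
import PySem

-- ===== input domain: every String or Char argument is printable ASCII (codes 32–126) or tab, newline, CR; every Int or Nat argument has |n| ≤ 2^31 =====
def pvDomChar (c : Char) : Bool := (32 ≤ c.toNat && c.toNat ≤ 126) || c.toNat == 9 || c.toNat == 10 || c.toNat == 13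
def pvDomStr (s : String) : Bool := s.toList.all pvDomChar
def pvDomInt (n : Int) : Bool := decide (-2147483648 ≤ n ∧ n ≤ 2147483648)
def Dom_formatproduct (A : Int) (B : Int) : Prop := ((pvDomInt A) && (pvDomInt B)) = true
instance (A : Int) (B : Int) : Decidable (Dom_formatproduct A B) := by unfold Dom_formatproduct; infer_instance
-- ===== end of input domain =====

-- B replaces A's sequential range product by a balanced divide-and-conquer product tree and strips
-- trailing zeros in chunks of 18 before finishing digit by digit (alternative algorithm, same value).

-- ===== PORT A =====

-- A's while loop: while val1 != 0: r = val1 % 10; if r == 0: count += 1; val1 //= 10; else: break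
def pvStripA (val1 : Int) (count : Int) : Int × Int :=
  if h : val1 ≠ 0 then
    if h2 : PySem.Int.mod val1 10 = 0 then
      pvStripA (PySem.Int.floordiv val1 10) (count + 1)
    else (val1, count)
  else (val1, count)
termination_by val1.natAbs
decreasing_by
  rw [PySem.Int.floordiv_eq_ediv_of_pos (by omega)]
  rw [PySem.Int.mod_eq_zero_iff_dvd] at h2
  omega

def formatproduct (A : Int) (B : Int) : String :=
  let x := A
  let y := B
  let val1 := (PySem.List.pyRange x (y + 1) 1).foldl (fun v i => v * i) 1
  let pr := pvStripA val1 0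
  let val1 := pr.1
  let count := pr.2
  let ac : List Char := []
  if PySem.Chars.len (PySem.Int.toChars val1) ≤ 10 then
    String.ofList (ac ++ PySem.Int.toChars val1 ++ "*".toList ++ "10".toList ++ "^".toList ++ PySem.Int.toChars count)
  else
    let s := PySem.Int.toChars val1
    let c1 := PySem.List.slice s none (some 5)
    let c2 := PySem.List.slice s (some ((PySem.Chars.len s : Int) - 5)) none
    String.ofList (ac ++ c1 ++ "...".toList ++ c2 ++ "*".toList ++ "10".toList ++ "^".toList ++ PySem.Int.toChars count)

-- ===== PORT B =====

def pvProdTree (lo : Int) (hi : Int) : Int :=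
  if lo > hi then 1
  else if _h : lo = hi then lo
  else
    let mid := PySem.Int.floordiv (lo + hi) 2
    pvProdTree lo mid * pvProdTree (mid + 1) hi
termination_by (hi - lo).toNat
decreasing_by
  · have h1 : lo ≤ PySem.Int.floordiv (lo + hi) 2 := by
      rw [PySem.Int.le_floordiv_iff_mul_le (by omega)]; omega
    have h2 : PySem.Int.floordiv (lo + hi) 2 < hi := by
      rw [PySem.Int.floordiv_lt_iff_lt_mul (by omega)]; omega
    omega
  · have h1 : lo ≤ PySem.Int.floordiv (lo + hi) 2 := by
      rw [PySem.Int.le_floordiv_iff_mul_le (by omega)]; omega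
    omega

-- while p != 0 and p % 10**18 == 0: p //= 10**18; count += 18
def pvStripChunk (p : Int) (count : Int) : Int × Int :=
  if h : p ≠ 0 ∧ PySem.Int.mod p 1000000000000000000 = 0 then
    pvStripChunk (PySem.Int.floordiv p 1000000000000000000) (count + 18)
  else (p, count)
termination_by p.natAbs
decreasing_by
  rw [PySem.Int.floordiv_eq_ediv_of_pos (by omega)]
  obtain ⟨h1, h2⟩ := h
  rw [PySem.Int.mod_eq_zero_iff_dvd] at h2
  omega

-- while p != 0 and p % 10 == 0: p //= 10; count += 1
def pvStripOnes (p : Int) (count : Int) : Int × Int :=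
  if h : p ≠ 0 ∧ PySem.Int.mod p 10 = 0 then
    pvStripOnes (PySem.Int.floordiv p 10) (count + 1)
  else (p, count)
termination_by p.natAbs
decreasing_by
  rw [PySem.Int.floordiv_eq_ediv_of_pos (by omega)]
  obtain ⟨h1, h2⟩ := h
  rw [PySem.Int.mod_eq_zero_iff_dvd] at h2
  omega

def formatproduct_alt (A : Int) (B : Int) : String :=
  let p0 := pvProdTree A B
  let pr1 := pvStripChunk p0 0
  let pr := pvStripOnes pr1.1 pr1.2
  let s := PySem.Int.toChars pr.1
  let s2 :=
    if 10 < PySem.Chars.len s then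
      PySem.List.slice s none (some 5) ++ "...".toList ++
        PySem.List.slice s (some ((PySem.Chars.len s : Int) - 5)) none
    else s
  String.ofList (s2 ++ "*10^".toList ++ PySem.Int.toChars pr.2)

-- ===== PRECONDITION & SPEC =====
def Spec_formatproduct (A : Int) (B : Int) (out : String) : Prop := out = formatproduct_alt A B
instance (A : Int) (B : Int) (out : String) : Decidable (Spec_formatproduct A B out) := by unfold Spec_formatproduct; infer_instance

-- ===== CLAIM (what is proved, stated in full; the proofs are below) =====
def Claim_equal_formatproduct : Prop := ∀ (A : Int) (B : Int), Dom_formatproduct A B → Spec_formatproduct A B (formatproduct A B)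

-- ===== LEMMAS AND PROOFS =====

theorem pvFoldlMul (l : List Int) (a : Int) :
    l.foldl (fun v i => v * i) a = a * l.foldl (fun v i => v * i) 1 := by
  induction l generalizing a with
  | nil => simp
  | cons x xs ih =>
    simp only [List.foldl_cons]
    rw [ih (a * x), ih (1 * x)]
    ring

-- the balanced product tree computes A's sequential product of range(lo, hi+1)
theorem pvProdTree_eq (lo hi : Int) :
    pvProdTree lo hi = (PySem.List.pyRange lo (hi + 1) 1).foldl (fun v i => v * i) 1 := by
  fun_induction pvProdTree with
  | case1 lo hi h =>
    rw [PySem.List.pyRange_one_eq_nil (by omega)]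
    rfl
  | case2 hi h =>
    rw [PySem.List.pyRange_one_singleton]
    simp
  | case3 lo hi h h2 mid ih2 ih1 =>
    have h1 : lo ≤ mid := by
      rw [show mid = PySem.Int.floordiv (lo + hi) 2 from rfl,
        PySem.Int.le_floordiv_iff_mul_le (by omega)]; omega
    have h3 : mid < hi := by
      rw [show mid = PySem.Int.floordiv (lo + hi) 2 from rfl,
        PySem.Int.floordiv_lt_iff_lt_mul (by omega)]; omega
    rw [PySem.List.pyRange_one_append lo (mid + 1) (hi + 1) (by omega) (by omega)]
    rw [List.foldl_append, ih2, ih1]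
    conv_rhs => rw [pvFoldlMul]

-- B's digit-by-digit finishing loop is exactly A's strip loop
theorem pvStripOnes_eq_pvStripA (p c : Int) : pvStripOnes p c = pvStripA p c := by
  fun_induction pvStripOnes with
  | case1 p c h ih =>
    rw [pvStripA, dif_pos h.1, dif_pos h.2, ih]
  | case2 p c h =>
    by_cases hp : p = 0
    · rw [pvStripA, dif_neg (by simp [hp])]
    · rw [pvStripA, dif_pos hp, dif_neg (by tauto)]

-- stripping k zeros at once = k single-digit steps of A's loop
theorem pvStripA_pow (k : Nat) (p c : Int) (hp : p ≠ 0) (hd : ((10 : Int) ^ k) ∣ p) :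
    pvStripA p c = pvStripA (PySem.Int.floordiv p ((10 : Int) ^ k)) (c + (k : Int)) := by
  induction k generalizing p c with
  | zero =>
    rw [pow_zero, PySem.Int.floordiv_eq_ediv_of_pos (by omega)]
    simp
  | succ k ih =>
    obtain ⟨q, hq⟩ := hd
    have h10 : (10 : Int) ∣ p := ⟨10 ^ k * q, by rw [hq]; ring⟩
    have hdiv : PySem.Int.floordiv p 10 = 10 ^ k * q := by
      rw [PySem.Int.floordiv_eq_ediv_of_pos (by omega), hq]
      rw [show (10:Int) ^ (k+1) * q = 10 * (10 ^ k * q) by ring]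
      exact Int.mul_ediv_cancel_left _ (by omega)
    have hq' : q ≠ 0 := by
      intro h; rw [h, mul_zero] at hq; exact hp hq
    have hstep : pvStripA p c = pvStripA (PySem.Int.floordiv p 10) (c + 1) := by
      rw [pvStripA, dif_pos hp, dif_pos (by rw [PySem.Int.mod_eq_zero_iff_dvd]; exact h10)]
    rw [hstep, hdiv, ih _ _ (by positivity) ⟨q, rfl⟩]
    have hk : PySem.Int.floordiv (10 ^ k * q) (10 ^ k) = q := by
      rw [PySem.Int.floordiv_eq_ediv_of_pos (by positivity)]
      exact Int.mul_ediv_cancel_left _ (by positivity)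
    have hPk : PySem.Int.floordiv p (10 ^ (k + 1)) = q := by
      rw [PySem.Int.floordiv_eq_ediv_of_pos (by positivity), hq]
      exact Int.mul_ediv_cancel_left _ (by positivity)
    rw [hk, hPk]
    congr 1
    push_cast
    ring

-- B's two-phase strip (chunks of 18, then singles) equals A's single-digit strip loop
theorem pvStrip_eq (p c : Int) :
    pvStripOnes (pvStripChunk p c).1 (pvStripChunk p c).2 = pvStripA p c := by
  fun_induction pvStripChunk with
  | case1 p c h ih =>
    rw [ih]
    obtain ⟨h1, h2⟩ := h
    rw [PySem.Int.mod_eq_zero_iff_dvd] at h2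
    rw [pvStripA_pow 18 p c h1 (by exact_mod_cast h2)]
    norm_num
  | case2 p c h =>
    exact pvStripOnes_eq_pvStripA p c

-- ===== VERDICT (by name: the statement is the Claim_ definition above) =====
theorem formatproduct_spec : Claim_equal_formatproduct := by
  intro A B _
  unfold Spec_formatproduct formatproduct formatproduct_alt
  dsimp only
  rw [pvProdTree_eq, pvStrip_eq]
  by_cases hlen :
      PySem.Chars.len (PySem.Int.toChars
        (pvStripA ((PySem.List.pyRange A (B + 1) 1).foldl (fun v i => v * i) 1) 0).1) ≤ 10
  · rw [if_pos hlen, if_neg (by omega)]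
    congr 1
    simp only [List.nil_append, List.append_assoc]
    rfl
  · rw [if_neg hlen, if_pos (by omega)]
    congr 1
    simp only [List.nil_append, List.append_assoc]
    rfl
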